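-- pv_equiv track=rewrite | github.com/rusccom/mamapack_tools | shopify_seo/api.py | text_after_label
-- ===== SOURCE A (Python) =====
-- def text_after_label(lines: list[str], label: str) -> str:
--     for index, raw_line in enumerate(lines):
--         line = raw_line.strip()
--         if line != label:
--             continue
--         for next_line in lines[index + 1 :]:
--             value = next_line.strip()
--             if value:
--                 return value
--     return ""
-- ===== SOURCE B (Python) =====
-- def text_after_label(lines: list[str], label: str) -> str:
--     seen = False
--     for raw in lines:
--         s = raw.strip()
--         if seen and s:
--             return s
--         if s == label:
--             seen = True
--     return ""
-- ===== Notes on version B (the rewrite author's own statement) =====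
-- stated objective: simpler
-- what changed: Replaces the nested scan (enumerate + a fresh inner scan over lines[index+1:] at every label match) with a single left-to-right pass keeping one boolean 'seen' flag, returning the first non-empty stripped line once the label has been seen.
import Mathlib
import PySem

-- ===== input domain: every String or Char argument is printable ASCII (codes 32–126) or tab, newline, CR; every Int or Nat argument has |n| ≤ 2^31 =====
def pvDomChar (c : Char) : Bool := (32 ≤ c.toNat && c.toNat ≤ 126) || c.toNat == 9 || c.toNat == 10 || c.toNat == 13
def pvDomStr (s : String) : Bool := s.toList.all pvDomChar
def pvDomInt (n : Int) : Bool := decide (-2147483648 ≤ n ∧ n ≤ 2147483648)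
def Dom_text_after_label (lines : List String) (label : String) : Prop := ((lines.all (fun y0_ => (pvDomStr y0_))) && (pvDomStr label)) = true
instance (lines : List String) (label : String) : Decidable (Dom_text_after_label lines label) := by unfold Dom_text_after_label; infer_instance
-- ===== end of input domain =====

-- B replaces A's nested scan with one pass keeping a boolean 'seen' flag (simpler; return value only).

-- ===== PORT A =====
-- inner loop: 'for next_line in <slice>: value = next_line.strip(); if value: return value'
def talInner : List String → Option String
  | [] => none
  | next_line :: rest =>
    let value := PySem.Str.strip next_line
    if value ≠ "" then some value else talInner rest

-- outer loop over enumerate(lines); on a label match, scan lines[index+1:]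
def talOuter (lines : List String) (label : String) : List (Int × String) → String
  | [] => ""
  | (index, raw_line) :: rest =>
    let line := PySem.Str.strip raw_line
    if line ≠ label then talOuter lines label rest
    else match talInner (PySem.List.slice lines (some (index + 1)) none) with
      | some v => v
      | none => talOuter lines label rest

def text_after_label (lines : List String) (label : String) : String :=
  talOuter lines label (PySem.List.enumerate lines 0)

-- ===== PORT B =====
-- single pass with a 'seen' flag
def talScan (label : String) : List String → Bool → String
  | [], _ => ""
  | raw :: rest, seen =>
    let s := PySem.Str.strip raw
    if seen = true ∧ s ≠ "" then s
    else if s = label then talScan label rest true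
    else talScan label rest seen

def text_after_label_alt (lines : List String) (label : String) : String :=
  talScan label lines false

-- ===== PRECONDITION & SPEC =====
def Spec_text_after_label (lines : List String) (label : String) (out : String) : Prop := out = text_after_label_alt lines label
instance (lines : List String) (label : String) (out : String) : Decidable (Spec_text_after_label lines label out) := by unfold Spec_text_after_label; infer_instance

-- ===== CLAIM (what is proved, stated in full; the proofs are below) =====
def Claim_equal_text_after_label : Prop := ∀ (lines : List String) (label : String), Dom_text_after_label lines label → Spec_text_after_label lines label (text_after_label lines label)

-- ===== LEMMAS AND PROOFS =====

-- enumerate at start s+1 is enumerate at start s with every index shifted by one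
lemma enumerate_shift {α : Type} (xs : List α) (s : Int) :
    PySem.List.enumerate xs (s + 1) = (PySem.List.enumerate xs s).map (fun p => (p.1 + 1, p.2)) := by
  induction xs generalizing s with
  | nil => simp [PySem.List.enumerate_nil]
  | cons x t ih =>
    simp [PySem.List.enumerate_cons, ih (s + 1)]

-- shifting all (nonnegative) indices by one while prepending an element leaves the outer loop unchanged
lemma talOuter_shift (x : String) (xs : List String) (label : String) (e : List (Int × String))
    (h : ∀ p ∈ e, 0 ≤ p.1) :
    talOuter (x :: xs) label (e.map (fun p => (p.1 + 1, p.2))) = talOuter xs label e := by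
  induction e with
  | nil => rfl
  | cons p t ih =>
    obtain ⟨i, raw⟩ := p
    have hi : 0 ≤ i := h (i, raw) (List.mem_cons_self ..)
    have ht : ∀ q ∈ t, 0 ≤ q.1 := fun q hq => h q (List.mem_cons_of_mem _ hq)
    have hslice : PySem.List.slice (x :: xs) (some (i + 1 + 1)) none
        = PySem.List.slice xs (some (i + 1)) none := by
      rw [PySem.List.slice_from _ (by omega : (0:Int) ≤ i + 1 + 1),
          PySem.List.slice_from _ (by omega : (0:Int) ≤ i + 1)]
      have h2 : (i + 1 + 1).toNat = (i + 1).toNat + 1 := by omega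
      rw [h2, List.drop_succ_cons]
    simp only [List.map_cons, talOuter, hslice, ih ht]

-- unfolding A one line at a time
lemma A_cons (x : String) (xs : List String) (label : String) :
    text_after_label (x :: xs) label =
      if PySem.Str.strip x = label then
        (match talInner xs with
          | some v => v
          | none => text_after_label xs label)
      else text_after_label xs label := by
  have hnn : ∀ p ∈ PySem.List.enumerate xs 0, 0 ≤ p.1 := by
    intro p hp
    rw [PySem.List.mem_enumerate_iff] at hp
    obtain ⟨k, hk, rfl⟩ := hp
    simp
  show talOuter (x :: xs) label (PySem.List.enumerate (x :: xs) 0) = _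
  rw [PySem.List.enumerate_cons]
  have hsh := enumerate_shift xs 0
  norm_num at hsh
  rw [show ((0:Int) + 1) = 1 by norm_num, hsh]
  simp only [talOuter]
  have hslice : PySem.List.slice (x :: xs) (some ((0 : Int) + 1)) none = xs := by
    rw [PySem.List.slice_from _ (by omega : (0:Int) ≤ 0 + 1)]; rfl
  rw [hslice, talOuter_shift x xs label _ hnn]
  by_cases h : PySem.Str.strip x = label
  · simp [h, text_after_label]
  · simp [h, text_after_label]

-- once 'seen', B returns the first non-empty stripped line (or "")
lemma talScan_seen (xs : List String) (label : String) :
    talScan label xs true = (match talInner xs with | some v => v | none => "") := by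
  induction xs with
  | nil => rfl
  | cons x t ih =>
    simp only [talScan, talInner]
    by_cases h : PySem.Str.strip x ≠ ""
    · simp [h]
    · simp only [h]
      by_cases hl : PySem.Str.strip x = label <;> simp [hl, ih]

-- if no line strips non-empty, A returns ""
lemma A_allEmpty (xs : List String) (label : String) (h : talInner xs = none) :
    text_after_label xs label = "" := by
  induction xs with
  | nil => rfl
  | cons x t ih =>
    have hx : ¬ (PySem.Str.strip x ≠ "") := by
      intro hne
      simp [talInner, hne] at h
    have ht : talInner t = none := by
      simpa [talInner, hx] using h
    rw [A_cons]
    by_cases hl : PySem.Str.strip x = label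
    · simp [hl, ht, ih ht]
    · simp [hl, ih ht]

lemma main_eq (xs : List String) (label : String) :
    text_after_label xs label = talScan label xs false := by
  induction xs with
  | nil => rfl
  | cons x t ih =>
    rw [A_cons]
    show _ = talScan label (x :: t) false
    simp only [talScan, Bool.false_eq_true, false_and, if_false]
    by_cases hl : PySem.Str.strip x = label
    · rw [if_pos hl, if_pos hl, talScan_seen]
      cases hti : talInner t with
      | some v => rfl
      | none => simpa using A_allEmpty t label hti
    · rw [if_neg hl, if_neg hl, ih]

-- ===== VERDICT (by name: the statement is the Claim_ definition above) =====
theorem text_after_label_spec : Claim_equal_text_after_label := by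
  intro lines label _
  show text_after_label lines label = text_after_label_alt lines label
  exact main_eq lines label
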